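-- pv_equiv track=rewrite | github.com/paulschreibergit/DRLJSSPBA25 | utils/conflict_utils.py | count_remaining_conflict_combinations
-- ===== SOURCE A (Python) =====
-- from collections import defaultdict
-- from math import comb
--
-- def count_remaining_conflict_combinations(jobs_data, partial_solution) -> int:
--     """
--     Zählt die Gesamtanzahl an Konfliktkombinationen über alle Maschinen.
--     Für jede Maschine mit k ungeplanten Operationen wird k über 2 gezählt.
--     """
--     machine_to_unplanned = defaultdict(list)
--
--     for j, job in enumerate(jobs_data):
--         for o, (machine, _) in enumerate(job):
--             if (j, o) not in partial_solution:
--                 machine_to_unplanned[machine].append((j, o))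
--
--     total = sum(comb(len(ops), 2) for ops in machine_to_unplanned.values() if len(ops) >= 2)
--     return total
-- ===== SOURCE B (Python) =====
-- from collections import defaultdict
--
-- def count_remaining_conflict_combinations(jobs_data, partial_solution) -> int:
--     # Single streaming pass: comb(k,2) = 0+1+...+(k-1), so add the number of
--     # previously seen unplanned ops on the same machine, then bump the counter.
--     seen = defaultdict(int)
--     total = 0
--     for j, job in enumerate(jobs_data):
--         for o, (machine, _) in enumerate(job):
--             if (j, o) not in partial_solution:
--                 total += seen[machine]
--                 seen[machine] += 1
--     return total
-- ===== Notes on version B (the rewrite author's own statement) =====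
-- stated objective: alternative
-- what changed: Replaces the group-then-reduce structure (build per-machine lists, then sum comb(len,2)) by a single streaming pass that keeps only a per-machine counter and accumulates the running total via comb(k,2)=0+1+...+(k-1), so no lists are stored and no comb/second aggregation pass exists.
import Mathlib
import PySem

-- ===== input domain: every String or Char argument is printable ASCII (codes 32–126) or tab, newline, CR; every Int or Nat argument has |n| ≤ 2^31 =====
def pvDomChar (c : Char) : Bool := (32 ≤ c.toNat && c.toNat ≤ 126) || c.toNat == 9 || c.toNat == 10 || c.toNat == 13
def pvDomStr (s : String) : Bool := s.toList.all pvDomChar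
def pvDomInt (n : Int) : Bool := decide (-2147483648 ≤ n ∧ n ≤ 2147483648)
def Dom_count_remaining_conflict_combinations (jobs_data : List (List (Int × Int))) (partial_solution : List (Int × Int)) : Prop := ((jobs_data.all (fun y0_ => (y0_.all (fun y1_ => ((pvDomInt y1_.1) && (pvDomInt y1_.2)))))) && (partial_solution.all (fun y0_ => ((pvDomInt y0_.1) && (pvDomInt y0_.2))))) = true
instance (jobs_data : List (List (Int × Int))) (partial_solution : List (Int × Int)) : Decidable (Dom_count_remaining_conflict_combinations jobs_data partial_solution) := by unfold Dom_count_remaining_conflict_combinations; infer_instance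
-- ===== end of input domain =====

-- B replaces A's group-then-reduce (per-machine lists, then sum comb(len,2)) by one streaming
-- pass with a per-machine counter, using comb(k,2)=0+1+...+(k-1); same cost, no stored lists.

-- ===== PORT A =====
def count_remaining_conflict_combinations (jobs_data : List (List (Int × Int))) (partial_solution : List (Int × Int)) : Int :=
  let d : PySem.Dict Int (List (Int × Int)) :=
    (PySem.List.enumerate jobs_data).foldl (fun d p =>
      (PySem.List.enumerate p.2).foldl (fun d q =>
        if partial_solution.contains (p.1, q.1) then d
        else d.modify q.2.1 [] (fun l => l ++ [(p.1, q.1)])) d)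
      PySem.Dict.empty
  d.values.foldl (fun acc ops => if 2 ≤ ops.length then acc + (Nat.choose ops.length 2 : Int) else acc) 0

-- ===== PORT B =====
def count_remaining_conflict_combinations_alt (jobs_data : List (List (Int × Int))) (partial_solution : List (Int × Int)) : Int :=
  ((PySem.List.enumerate jobs_data).foldl (fun st p =>
      (PySem.List.enumerate p.2).foldl (fun st q =>
        if partial_solution.contains (p.1, q.1) then st
        else (st.1.modify q.2.1 0 (fun c => c + 1), st.2 + st.1.getD q.2.1 0)) st)
      ((PySem.Dict.empty : PySem.Dict Int Int), (0 : Int))).2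

-- ===== PRECONDITION & SPEC =====
def Spec_count_remaining_conflict_combinations (jobs_data : List (List (Int × Int))) (partial_solution : List (Int × Int)) (out : Int) : Prop := out = count_remaining_conflict_combinations_alt jobs_data partial_solution
instance (jobs_data : List (List (Int × Int))) (partial_solution : List (Int × Int)) (out : Int) : Decidable (Spec_count_remaining_conflict_combinations jobs_data partial_solution out) := by unfold Spec_count_remaining_conflict_combinations; infer_instance

-- ===== CLAIM (what is proved, stated in full; the proofs are below) =====
def Claim_equal_count_remaining_conflict_combinations : Prop := ∀ (jobs_data : List (List (Int × Int))) (partial_solution : List (Int × Int)), Dom_count_remaining_conflict_combinations jobs_data partial_solution → Spec_count_remaining_conflict_combinations jobs_data partial_solution (count_remaining_conflict_combinations jobs_data partial_solution)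

-- ===== LEMMAS AND PROOFS =====

-- length-image of A's dict: same keys, each value replaced by its length
def pvLen (d : PySem.Dict Int (List (Int × Int))) : PySem.Dict Int Int :=
  ⟨d.items.map (fun p => (p.1, (p.2.length : Int)))⟩

-- mathematical total of A's dict
def pvSum (d : PySem.Dict Int (List (Int × Int))) : Int :=
  (d.values.map (fun ops => (Nat.choose ops.length 2 : Int))).sum

theorem pvLen_getD (d : PySem.Dict Int (List (Int × Int))) (m : Int) :
    (pvLen d).getD m 0 = ((d.getD m []).length : Int) := by
  obtain ⟨l⟩ := d
  induction l with
  | nil => simp [pvLen, PySem.Dict.getD, PySem.Dict.get?]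
  | cons p t ih =>
    by_cases h : p.1 = m
    · simp [pvLen, PySem.Dict.getD, PySem.Dict.get?, List.find?, h]
    · have hb : (p.1 == m) = false := by simp [h]
      simp only [pvLen, PySem.Dict.getD, PySem.Dict.get?, List.map_cons, List.find?,
        hb] at *
      simpa using ih

theorem pvLen_contains (d : PySem.Dict Int (List (Int × Int))) (m : Int) :
    (pvLen d).contains m = d.contains m := by
  obtain ⟨l⟩ := d
  simp only [pvLen, PySem.Dict.contains, List.any_map]
  rfl

theorem pvLen_modify (d : PySem.Dict Int (List (Int × Int))) (m : Int) (x : Int × Int) :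
    pvLen (d.modify m [] (fun l => l ++ [x])) = (pvLen d).modify m 0 (fun c => c + 1) := by
  have hc := pvLen_contains d m
  have hg := pvLen_getD d m
  simp only [PySem.Dict.modify, PySem.Dict.insert, hc, hg]
  by_cases h : d.contains m = true
  · simp only [h, if_pos]
    unfold pvLen
    obtain ⟨l⟩ := d
    simp only [List.map_map]
    congr 1
    apply List.map_congr_left
    intro p _
    by_cases hp : p.1 = m <;> simp [hp, Function.comp]
  · simp only [h, if_neg, Bool.not_eq_true]
    unfold pvLen
    obtain ⟨l⟩ := d
    simp

theorem not_mem_map_self {t : List (Int × List (Int × Int))} {m : Int} {v : List (Int × Int)}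
    (hnm : m ∉ t.map Prod.fst) :
    t.map (fun p => if (p.1 == m) = true then (m, v) else p) = t := by
  induction t with
  | nil => rfl
  | cons p t ih =>
    simp only [List.map_cons, List.mem_cons, not_or] at hnm
    have h1 : ¬ ((p.1 == m) = true) := by
      simp only [beq_iff_eq]
      exact fun h => hnm.1 h.symm
    rw [List.map_cons, if_neg h1, ih hnm.2]

-- pvSum at the level of the underlying items list
def pvS (l : List (Int × List (Int × Int))) : Int :=
  (l.map (fun p => (Nat.choose p.2.length 2 : Int))).sum

theorem pvSum_eq_pvS (d : PySem.Dict Int (List (Int × Int))) : pvSum d = pvS d.items := by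
  obtain ⟨l⟩ := d
  simp only [pvSum, pvS, PySem.Dict.values, List.map_map]
  rfl

theorem choose_two_succ (n : Nat) :
    (Nat.choose (n + 1) 2 : Int) = (Nat.choose n 2 : Int) + n := by
  rw [Nat.choose_succ_succ]
  push_cast
  rw [Nat.choose_one_right]
  ring

theorem pvS_replace (m : Int) (x : Int × Int) :
    ∀ (l : List (Int × List (Int × Int))) (q : Int × List (Int × Int)),
    (l.map Prod.fst).Nodup →
    l.find? (fun p => p.1 == m) = some q →
    pvS (l.map (fun p => if (p.1 == m) = true then (m, q.2 ++ [x]) else p))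
      = pvS l + (q.2.length : Int) := by
  intro l
  induction l with
  | nil => intro q _ hf; simp at hf
  | cons p t ih =>
    intro q hnd hf
    by_cases h : p.1 = m
    · have hb : (p.1 == m) = true := by simp [h]
      rw [List.find?_cons_of_pos (p := fun r : Int × List (Int × Int) => r.1 == m) hb] at hf
      obtain rfl : p = q := by injection hf
      have hnm : m ∉ t.map Prod.fst := by
        simp only [List.map_cons, List.nodup_cons] at hnd
        simpa [h] using hnd.1
      simp only [List.map_cons, hb, if_pos]
      rw [not_mem_map_self hnm]
      simp only [pvS, List.map_cons, List.sum_cons, List.length_append, List.length_cons,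
        List.length_nil]
      rw [show p.2.length + (0 + 1) = p.2.length + 1 by omega, choose_two_succ]
      ring
    · have hb : (p.1 == m) = false := by simp [h]
      rw [List.find?_cons_of_neg (p := fun r : Int × List (Int × Int) => r.1 == m) (by simp [hb])] at hf
      have hnd' : (t.map Prod.fst).Nodup := by
        simp only [List.map_cons, List.nodup_cons] at hnd; exact hnd.2
      have := ih q hnd' hf
      simp only [List.map_cons, hb, Bool.false_eq_true, if_neg, not_false_iff,
        pvS, List.sum_cons] at this ⊢
      omega

theorem find?_of_contains (l : List (Int × List (Int × Int))) (m : Int)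
    (h : (l.any fun p => p.1 == m) = true) :
    ∃ q, l.find? (fun p => p.1 == m) = some q := by
  rcases hq : l.find? (fun p => p.1 == m) with _ | q
  · exfalso
    obtain ⟨p, hp, hpm⟩ := List.any_eq_true.mp h
    exact absurd hpm (by simpa using List.find?_eq_none.mp hq p hp)
  · exact ⟨q, hq⟩

theorem pvSum_modify (d : PySem.Dict Int (List (Int × Int))) (m : Int) (x : Int × Int)
    (hnd : (d.items.map Prod.fst).Nodup) :
    pvSum (d.modify m [] (fun l => l ++ [x])) = pvSum d + ((d.getD m []).length : Int) := by
  simp only [PySem.Dict.modify, PySem.Dict.insert]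
  by_cases h : d.contains m = true
  · obtain ⟨q, hq⟩ := find?_of_contains d.items m h
    have hgd : d.getD m [] = q.2 := by
      simp [PySem.Dict.getD, PySem.Dict.get?, hq]
    simp only [h, if_pos]
    rw [pvSum_eq_pvS, pvSum_eq_pvS, hgd]
    exact pvS_replace m x d.items q hnd hq
  · have hg : d.getD m [] = [] := by
      rcases hq : d.items.find? (fun p => p.1 == m) with _ | q
      · simp [PySem.Dict.getD, PySem.Dict.get?, hq]
      · exfalso
        apply h
        have h1 := List.mem_of_find?_eq_some hq
        have h2 := List.find?_some hq
        exact List.any_eq_true.mpr ⟨q, h1, h2⟩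
    simp only [h, if_neg, Bool.not_eq_true]
    rw [pvSum_eq_pvS, pvSum_eq_pvS, hg]
    simp [pvS]

theorem pvNodup_modify (d : PySem.Dict Int (List (Int × Int))) (m : Int) (x : Int × Int)
    (hnd : (d.items.map Prod.fst).Nodup) :
    ((d.modify m [] (fun l => l ++ [x])).items.map Prod.fst).Nodup := by
  simp only [PySem.Dict.modify, PySem.Dict.insert]
  by_cases h : d.contains m = true
  · simp only [h, if_pos, List.map_map]
    have : (d.items.map (Prod.fst ∘ fun p =>
        if (p.1 == m) = true then (m, d.getD m [] ++ [x]) else p)) = d.items.map Prod.fst := by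
      apply List.map_congr_left
      intro p _
      by_cases hp : p.1 = m <;> simp [hp, Function.comp]
    rw [this]
    exact hnd
  · have hm : m ∉ d.items.map Prod.fst := by
      intro hmem
      obtain ⟨p, hp, hpe⟩ := List.mem_map.mp hmem
      apply h
      exact List.any_eq_true.mpr ⟨p, hp, by simp [hpe]⟩
    simp only [h, if_neg, Bool.not_eq_true, List.map_append, List.map_cons,
      List.map_nil]
    simp only [List.nodup_append, List.nodup_cons, List.nodup_nil]
    refine ⟨hnd, by simp, ?_⟩
    intro a ha b hb
    have hb' : b = m := by simpa using hb
    exact fun he => hm (by rw [← hb', ← he]; exact ha)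

-- coupling invariant through the inner loop
theorem inner_loop (partial_solution : List (Int × Int)) (jv : Int)
    (ops : List (Int × (Int × Int))) :
    ∀ (d : PySem.Dict Int (List (Int × Int))) (seen : PySem.Dict Int Int) (total : Int),
    seen = pvLen d → total = pvSum d → (d.items.map Prod.fst).Nodup →
    (let d' := ops.foldl (fun d q =>
        if partial_solution.contains (jv, q.1) then d
        else d.modify q.2.1 [] (fun l => l ++ [(jv, q.1)])) d
     let st' := ops.foldl (fun st q =>
        if partial_solution.contains (jv, q.1) then st
        else (st.1.modify q.2.1 0 (fun c => c + 1), st.2 + st.1.getD q.2.1 0)) (seen, total)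
     st'.1 = pvLen d' ∧ st'.2 = pvSum d' ∧ (d'.items.map Prod.fst).Nodup) := by
  induction ops with
  | nil => intro d seen total h1 h2 h3; exact ⟨h1, h2, h3⟩
  | cons q t ih =>
    intro d seen total h1 h2 h3
    simp only [List.foldl_cons]
    by_cases hc : partial_solution.contains (jv, q.1) = true
    · simp only [hc, if_pos]
      exact ih d seen total h1 h2 h3
    · simp only [hc, if_neg, Bool.not_eq_true]
      apply ih
      · rw [h1, pvLen_modify]
      · rw [h2, h1, pvLen_getD, pvSum_modify d q.2.1 (jv, q.1) h3]
      · exact pvNodup_modify d q.2.1 (jv, q.1) h3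

-- coupling invariant through the outer loop
theorem outer_loop (partial_solution : List (Int × Int))
    (jobs : List (Int × List (Int × Int))) :
    ∀ (d : PySem.Dict Int (List (Int × Int))) (seen : PySem.Dict Int Int) (total : Int),
    seen = pvLen d → total = pvSum d → (d.items.map Prod.fst).Nodup →
    (let d' := jobs.foldl (fun d p =>
        (PySem.List.enumerate p.2).foldl (fun d q =>
          if partial_solution.contains (p.1, q.1) then d
          else d.modify q.2.1 [] (fun l => l ++ [(p.1, q.1)])) d) d
     let st' := jobs.foldl (fun st p =>
        (PySem.List.enumerate p.2).foldl (fun st q =>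
          if partial_solution.contains (p.1, q.1) then st
          else (st.1.modify q.2.1 0 (fun c => c + 1), st.2 + st.1.getD q.2.1 0)) st) (seen, total)
     st'.1 = pvLen d' ∧ st'.2 = pvSum d' ∧ (d'.items.map Prod.fst).Nodup) := by
  induction jobs with
  | nil => intro d seen total h1 h2 h3; exact ⟨h1, h2, h3⟩
  | cons p t ih =>
    intro d seen total h1 h2 h3
    simp only [List.foldl_cons]
    obtain ⟨h1', h2', h3'⟩ :=
      inner_loop partial_solution p.1 (PySem.List.enumerate p.2) d seen total h1 h2 h3
    exact ih _ _ _ h1' h2' h3'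

-- A's final aggregation pass computes pvSum
theorem final_sum_list :
    ∀ (vs : List (List (Int × Int))) (acc : Int),
    vs.foldl (fun acc ops => if 2 ≤ ops.length then acc + (Nat.choose ops.length 2 : Int) else acc) acc
      = acc + (vs.map (fun ops => (Nat.choose ops.length 2 : Int))).sum := by
  intro vs
  induction vs with
  | nil => intro acc; simp
  | cons v t ih =>
    intro acc
    by_cases h : 2 ≤ v.length
    · simp only [List.foldl_cons, List.map_cons, List.sum_cons, h, if_pos, ih]
      ring
    · have h0 : Nat.choose v.length 2 = 0 := Nat.choose_eq_zero_of_lt (by omega)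
      simp only [List.foldl_cons, List.map_cons, List.sum_cons, h, if_neg, not_false_iff, ih, h0]
      simp

theorem final_sum (d : PySem.Dict Int (List (Int × Int))) :
    d.values.foldl (fun acc ops => if 2 ≤ ops.length then acc + (Nat.choose ops.length 2 : Int) else acc) 0
      = pvSum d := by
  unfold pvSum
  rw [final_sum_list]
  ring

-- ===== VERDICT (by name: the statement is the Claim_ definition above) =====
theorem count_remaining_conflict_combinations_spec : Claim_equal_count_remaining_conflict_combinations := by
  intro jobs_data partial_solution _
  unfold Spec_count_remaining_conflict_combinations
  unfold count_remaining_conflict_combinations count_remaining_conflict_combinations_alt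
  obtain ⟨h1, h2, _⟩ := outer_loop partial_solution (PySem.List.enumerate jobs_data)
    PySem.Dict.empty PySem.Dict.empty 0
    (by rfl) (by simp [pvSum, PySem.Dict.values, PySem.Dict.empty])
    (by simp [PySem.Dict.empty])
  simp only []
  rw [final_sum, ← h2]
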